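-- pv_equiv track=rewrite | github.com/chriseeg/social-counter | Code/instapy_test_alt.py | insta_get_media_url
-- ===== SOURCE A (Python) =====
-- def insta_get_media_url(media_id):
--     media_id = int(media_id)
--     alphabet = 'ABCDEFGHIJKLMNOPQRSTUVWXYZabcdefghijklmnopqrstuvwxyz0123456789-_'
--     shortened_id = ''
--     while media_id > 0:
--         remainder = media_id % 64
--         # dual conversion sign gets the right ID for new posts
--         media_id = (media_id - remainder) // 64
--         # remainder should be casted as an integer to avoid a type error.
--         shortened_id = alphabet[int(remainder)] + shortened_id
--
--     return 'https://instagram.com/p/' + shortened_id + '/'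
-- ===== SOURCE B (Python) =====
-- def insta_get_media_url(media_id):
--     media_id = int(media_id)
--     alphabet = 'ABCDEFGHIJKLMNOPQRSTUVWXYZabcdefghijklmnopqrstuvwxyz0123456789-_'
--     digits = []
--     if media_id > 0:
--         power = 1
--         while power * 64 <= media_id:
--             power *= 64
--         while power >= 1:
--             digits.append(alphabet[(media_id // power) % 64])
--             power //= 64
--     return 'https://instagram.com/p/' + ''.join(digits) + '/'
-- ===== Notes on version B (the rewrite author's own statement) =====
-- stated objective: alternative
-- what changed: Replaces A's LSB-first divmod loop that prepends characters with a most-significant-digit-first emission: find the highest power of 64 not exceeding media_id, then append digits left to right by dividing by descending powers.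
import Mathlib
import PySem

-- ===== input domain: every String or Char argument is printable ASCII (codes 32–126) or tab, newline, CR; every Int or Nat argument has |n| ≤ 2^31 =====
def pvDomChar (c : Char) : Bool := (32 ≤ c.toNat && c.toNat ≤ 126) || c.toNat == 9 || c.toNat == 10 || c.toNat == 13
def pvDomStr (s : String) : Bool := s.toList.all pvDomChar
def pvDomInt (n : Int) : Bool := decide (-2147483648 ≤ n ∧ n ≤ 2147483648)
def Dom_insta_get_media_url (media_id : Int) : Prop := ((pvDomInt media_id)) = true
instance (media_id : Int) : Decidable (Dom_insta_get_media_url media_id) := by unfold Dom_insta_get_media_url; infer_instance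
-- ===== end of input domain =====

-- B emits the base-64 digits most-significant-first via descending powers of 64 (appending),
-- where A emits them least-significant-first via divmod (prepending); same return value.

-- ===== PORT A =====
def pvAlphabet : List Char :=
  "ABCDEFGHIJKLMNOPQRSTUVWXYZabcdefghijklmnopqrstuvwxyz0123456789-_".toList

-- A's while-loop: divmod by 64, prepend the digit character.
def pvALoop (media_id : Int) (shortened_id : List Char) : List Char :=
  if media_id > 0 then
    let remainder := PySem.Int.mod media_id 64
    pvALoop (PySem.Int.floordiv (media_id - remainder) 64)
      (PySem.List.pyGetD pvAlphabet remainder ' ' :: shortened_id)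
  else shortened_id
termination_by media_id.toNat
decreasing_by
  simp only [PySem.Int.mod_eq_emod_of_pos (by norm_num : (0:Int) < 64),
    PySem.Int.floordiv_eq_ediv_of_pos (by norm_num : (0:Int) < 64)]
  omega

def insta_get_media_url (media_id : Int) : String :=
  "https://instagram.com/p/" ++ String.ofList (pvALoop media_id []) ++ "/"

-- ===== PORT B =====
-- first while-loop of B: grow power by factors of 64 while power*64 <= n
-- (the 0 < power invariant is carried as a hypothesis only for termination).
def pvFindPower (n : Int) (power : Int) (hp : 0 < power) : Int :=
  if power * 64 ≤ n then pvFindPower n (power * 64) (by positivity) else power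
termination_by (n - power).toNat
decreasing_by omega

-- second while-loop of B: append alphabet[(n // power) % 64], divide power by 64.
def pvBLoop (n : Int) (power : Int) (digits : List Char) : List Char :=
  if power ≥ 1 then
    pvBLoop n (PySem.Int.floordiv power 64)
      (digits ++ [PySem.List.pyGetD pvAlphabet
        (PySem.Int.mod (PySem.Int.floordiv n power) 64) ' '])
  else digits
termination_by power.toNat
decreasing_by
  simp only [PySem.Int.floordiv_eq_ediv_of_pos (by norm_num : (0:Int) < 64)]
  omega

def insta_get_media_url_alt (media_id : Int) : String :=
  let digits : List Char :=
    if media_id > 0 then pvBLoop media_id (pvFindPower media_id 1 one_pos) [] else []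
  "https://instagram.com/p/" ++ String.ofList digits ++ "/"

-- ===== PRECONDITION & SPEC =====
def Spec_insta_get_media_url (media_id : Int) (out : String) : Prop := out = insta_get_media_url_alt media_id
instance (media_id : Int) (out : String) : Decidable (Spec_insta_get_media_url media_id out) := by unfold Spec_insta_get_media_url; infer_instance

-- ===== CLAIM (what is proved, stated in full; the proofs are below) =====
def Claim_equal_insta_get_media_url : Prop := ∀ (media_id : Int), Dom_insta_get_media_url media_id → Spec_insta_get_media_url media_id (insta_get_media_url media_id)

-- ===== LEMMAS AND PROOFS =====

-- digit character, abbreviation for the proofs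
def pvD (r : Int) : Char := PySem.List.pyGetD pvAlphabet r ' '

-- k-digit zero-padded base-64 representation (LSB-structured)
def pvPad (n : Int) : Nat → List Char
  | 0 => []
  | k + 1 => pvPad (n / 64) k ++ [pvD (n % 64)]

theorem pvALoop_acc (n : Int) (a b : List Char) :
    pvALoop n (a ++ b) = pvALoop n a ++ b := by
  fun_induction pvALoop n a with
  | case1 m acc h r ih =>
      rw [pvALoop, if_pos h]
      exact ih
  | case2 m acc h =>
      rw [pvALoop, if_neg h]

theorem pvALoop_step (n : Int) (h : n > 0) :
    pvALoop n [] = pvALoop (n / 64) [] ++ [pvD (n % 64)] := by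
  rw [pvALoop, if_pos h]
  simp only [PySem.Int.mod_eq_emod_of_pos (by norm_num : (0:Int) < 64),
    PySem.Int.floordiv_eq_ediv_of_pos (by norm_num : (0:Int) < 64)]
  have h64 : (n - n % 64) / 64 = n / 64 := by omega
  rw [h64]
  simpa [pvD] using pvALoop_acc (n / 64) [] [pvD (n % 64)]

theorem pvPad_msb (k : Nat) (n : Int) (hn : 0 ≤ n) :
    pvPad n (k + 1) = pvD (n / 64 ^ k % 64) :: pvPad n k := by
  induction k generalizing n with
  | zero => simp [pvPad]
  | succ k ih =>
      show pvPad (n / 64) (k + 1) ++ [pvD (n % 64)] = _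
      rw [ih (n / 64) (by positivity)]
      have : n / 64 / 64 ^ k = n / 64 ^ (k + 1) := by
        rw [Int.ediv_ediv_of_nonneg (by norm_num : (0:Int) ≤ 64), pow_succ, mul_comm]
      rw [this]
      rfl

theorem pvBLoop_pow (k : Nat) (n : Int) (hn : 0 ≤ n) (acc : List Char) :
    pvBLoop n ((64 : Int) ^ k) acc = acc ++ pvD (n / 64 ^ k % 64) :: pvPad n k := by
  induction k generalizing acc with
  | zero =>
      rw [pvBLoop, if_pos (by norm_num)]
      simp only [pow_zero]
      rw [show PySem.Int.floordiv 1 64 = 0 by decide, pvBLoop, if_neg (by norm_num)]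
      simp [pvPad, pvD]
  | succ k ih =>
      rw [pvBLoop, if_pos (one_le_pow₀ (by norm_num))]
      have hdiv : PySem.Int.floordiv ((64:Int) ^ (k+1)) 64 = 64 ^ k := by
        rw [PySem.Int.floordiv_eq_ediv_of_pos (by norm_num : (0:Int) < 64), pow_succ,
          Int.mul_ediv_cancel _ (by norm_num)]
      rw [hdiv, ih]
      rw [pvPad_msb k n hn, List.append_assoc]
      simp [pvD]

theorem pvALoop_eq_pad (k : Nat) (n : Int) (h1 : (64 : Int) ^ k ≤ n) (h2 : n < 64 ^ (k + 1)) :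
    pvALoop n [] = pvPad n (k + 1) := by
  induction k generalizing n with
  | zero =>
      rw [pvALoop_step n (by simpa using h1)]
      have : n / 64 = 0 := by omega
      rw [this, pvALoop, if_neg (by norm_num)]
      simp [pvPad]
  | succ k ih =>
      have hpos : (0 : Int) < 64 ^ (k + 1) := by positivity
      rw [pvALoop_step n (by omega)]
      have hlo : (64 : Int) ^ k ≤ n / 64 := by
        rw [Int.le_ediv_iff_mul_le (by norm_num)]
        calc (64:Int) ^ k * 64 = 64 ^ (k+1) := by ring
        _ ≤ n := h1
      have hhi : n / 64 < 64 ^ (k + 1) := by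
        rw [Int.ediv_lt_iff_lt_mul (by norm_num)]
        calc n < 64 ^ (k + 2) := h2
        _ = 64 ^ (k+1) * 64 := by ring
      rw [ih (n / 64) hlo hhi]
      rfl

theorem pvFindPower_spec (n p : Int) (hp : 0 < p) :
    p ≤ n → ∃ k : Nat, pvFindPower n p hp = p * 64 ^ k ∧
      pvFindPower n p hp ≤ n ∧ n < pvFindPower n p hp * 64 := by
  fun_induction pvFindPower n p hp with
  | case1 q hq h ih =>
      intro _
      obtain ⟨k, hk, hle', hlt⟩ := ih h
      exact ⟨k + 1, by rw [hk]; ring, hle', hlt⟩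
  | case2 q hq h =>
      intro hle
      exact ⟨0, by ring, hle, by omega⟩

-- ===== VERDICT (by name: the statement is the Claim_ definition above) =====
theorem insta_get_media_url_spec : Claim_equal_insta_get_media_url := by
  intro n _
  unfold Spec_insta_get_media_url insta_get_media_url insta_get_media_url_alt
  by_cases hn : n > 0
  · simp only [if_pos hn]
    obtain ⟨k, hk, hle, hlt⟩ := pvFindPower_spec n 1 one_pos (by omega)
    rw [one_mul] at hk
    rw [hk] at hle hlt ⊢
    rw [pvBLoop_pow k n (by omega) [], List.nil_append, ← pvPad_msb k n (by omega),
      pvALoop_eq_pad k n hle (by rw [pow_succ]; omega)]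
  · simp only [if_neg hn]
    rw [pvALoop, if_neg hn]
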